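-- pv_equiv track=rewrite | github.com/daniel-reich/ubiquitous-fiesta | X4v5Bh89P3inLEHH4_9.py | spin_around
-- ===== SOURCE A (Python) =====
-- def spin_around(lst):
--   deg_lst = []
--   for item in lst:
--     if item == "right":
--       deg_lst.append(90)
--     else:
--       deg_lst.append(-90)
--   result = abs(sum(deg_lst))
--   ans = result//360
--   return ans
-- ===== SOURCE B (Python) =====
-- def spin_around(lst):
--   stack = []
--   for item in lst:
--     if stack and stack[-1] != (item == "right"):
--       stack.pop()
--     else:
--       stack.append(item == "right")
--   return len(stack) // 4
-- ===== Notes on version B (the rewrite author's own statement) =====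
-- stated objective: alternative
-- what changed: Replaces building a list of +/-90 degrees, summing it and dividing by 360 with a cancellation stack that pops each turn against an opposite turn on top, so the stack ends holding only the surplus direction and len(stack)//4 is the number of full rotations.
import Mathlib
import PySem

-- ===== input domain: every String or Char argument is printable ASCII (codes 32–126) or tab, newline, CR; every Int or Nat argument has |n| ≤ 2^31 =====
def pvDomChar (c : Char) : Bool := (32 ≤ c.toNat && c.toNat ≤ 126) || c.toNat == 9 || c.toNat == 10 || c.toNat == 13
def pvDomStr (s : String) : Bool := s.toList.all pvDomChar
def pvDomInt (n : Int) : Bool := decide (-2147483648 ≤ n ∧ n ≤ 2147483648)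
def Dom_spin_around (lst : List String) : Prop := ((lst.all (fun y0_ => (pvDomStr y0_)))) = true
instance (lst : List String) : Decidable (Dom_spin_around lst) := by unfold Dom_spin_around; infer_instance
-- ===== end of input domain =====

-- B replaces "build a ±90-degree list, sum, abs, //360" with a cancellation stack: each turn pops an
-- opposite turn off the stack or is pushed, so the stack ends holding only the surplus turns and
-- len(stack)//4 is the number of full rotations; alternative algorithm, same O(n) cost.

-- ===== PORT A =====
def spin_around (lst : List String) : Int :=
  let deg_lst : List Int := lst.foldl (fun acc item => acc ++ [if item == "right" then (90 : Int) else -90]) []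
  let result : Int := |deg_lst.sum|
  let ans : Int := PySem.Int.floordiv result 360
  ans

-- ===== PORT B =====
-- one step of Source B's loop body: pop if the top is the opposite turn, else push
def spinStep (stack : List Bool) (item : String) : List Bool :=
  match stack.getLast? with
  | some top => if top ≠ (item == "right") then stack.dropLast else stack ++ [item == "right"]
  | none => stack ++ [item == "right"]

def spin_around_alt (lst : List String) : Int :=
  let stack : List Bool := lst.foldl spinStep []
  PySem.Int.floordiv (stack.length : Int) 4

-- ===== PRECONDITION & SPEC =====
def Spec_spin_around (lst : List String) (out : Int) : Prop := out = spin_around_alt lst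
instance (lst : List String) (out : Int) : Decidable (Spec_spin_around lst out) := by unfold Spec_spin_around; infer_instance

-- ===== CLAIM (what is proved, stated in full; the proofs are below) =====
def Claim_equal_spin_around : Prop := ∀ (lst : List String), Dom_spin_around lst → Spec_spin_around lst (spin_around lst)

-- ===== LEMMAS AND PROOFS =====

-- canonical shape of B's stack after a prefix with running balance `bal` (rights minus lefts)
def fstack (bal : Int) : List Bool := List.replicate bal.natAbs (decide (0 < bal))

theorem replicate_zero_irrel (k : Nat) (a b : Bool) (h : k = 0) :
    List.replicate k a = List.replicate k b := by subst h; simp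

theorem fstack_getLast? (bal : Int) (h : bal ≠ 0) :
    (fstack bal).getLast? = some (decide (0 < bal)) := by
  unfold fstack
  rw [List.getLast?_eq_getElem?]
  simp only [List.length_replicate, List.getElem?_replicate]
  rw [if_pos (by omega)]

theorem fstack_zero : fstack 0 = [] := rfl

theorem fstack_push_pos (bal : Int) (h : 0 ≤ bal) : fstack bal ++ [true] = fstack (bal + 1) := by
  unfold fstack
  have h1 : (bal + 1).natAbs = bal.natAbs + 1 := by omega
  by_cases h0 : bal = 0
  · subst h0; simp
  · rw [h1, show (decide (0 < bal + 1)) = true from by simp; omega,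
        show (decide (0 < bal)) = true from by simp; omega, ← List.replicate_succ']

theorem fstack_push_neg (bal : Int) (h : bal ≤ 0) : fstack bal ++ [false] = fstack (bal - 1) := by
  unfold fstack
  have h1 : (bal - 1).natAbs = bal.natAbs + 1 := by omega
  rw [h1, show (decide (0 < bal - 1)) = false from by simp; omega,
      show (decide (0 < bal)) = false from by simp; omega, ← List.replicate_succ']

theorem fstack_pop_pos (bal : Int) (h : 0 < bal) : (fstack bal).dropLast = fstack (bal - 1) := by
  unfold fstack
  rw [List.dropLast_replicate]
  have hn : bal.natAbs - 1 = (bal - 1).natAbs := by omega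
  rw [hn]
  by_cases h1 : bal = 1
  · exact replicate_zero_irrel _ _ _ (by omega)
  · congr 1; simp; omega

theorem fstack_pop_neg (bal : Int) (h : bal < 0) : (fstack bal).dropLast = fstack (bal + 1) := by
  unfold fstack
  rw [List.dropLast_replicate]
  have hn : bal.natAbs - 1 = (bal + 1).natAbs := by omega
  rw [hn]
  by_cases h1 : bal = -1
  · exact replicate_zero_irrel _ _ _ (by omega)
  · congr 1; simp; omega

theorem spinStep_fstack (bal : Int) (item : String) :
    spinStep (fstack bal) item = fstack (bal + (if item == "right" then 1 else -1)) := by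
  unfold spinStep
  by_cases ht : (item == "right") = true
  · rw [ht]
    simp only [if_true]
    rcases lt_trichotomy bal 0 with hb | hb | hb
    · rw [fstack_getLast? bal (by omega), show (decide (0 < bal)) = false from by simp; omega]
      simp only [ne_eq, Bool.false_eq_true, not_false_eq_true, if_true]
      exact fstack_pop_neg bal hb
    · subst hb
      simpa [fstack_zero] using fstack_push_pos 0 le_rfl
    · rw [fstack_getLast? bal (by omega), show (decide (0 < bal)) = true from by simp; omega]
      simp only [ne_eq, not_true_eq_false, if_false]
      exact fstack_push_pos bal (by omega)
  · have ht' : (item == "right") = false := by simpa using ht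
    rw [ht']
    simp only [Bool.false_eq_true, if_false]
    rw [show bal + -1 = bal - 1 from by ring]
    rcases lt_trichotomy bal 0 with hb | hb | hb
    · rw [fstack_getLast? bal (by omega), show (decide (0 < bal)) = false from by simp; omega]
      simp only [ne_eq, not_true_eq_false, if_false]
      exact fstack_push_neg bal (by omega)
    · subst hb
      simpa [fstack_zero] using fstack_push_neg 0 le_rfl
    · rw [fstack_getLast? bal (by omega), show (decide (0 < bal)) = true from by simp; omega]
      simp only [ne_eq, Bool.true_eq_false, not_false_eq_true, if_true]
      exact fstack_pop_pos bal hb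

theorem foldl_spinStep (lst : List String) (bal : Int) :
    lst.foldl spinStep (fstack bal)
      = fstack (lst.foldl (fun b item => b + (if item == "right" then 1 else -1)) bal) := by
  induction lst generalizing bal with
  | nil => rfl
  | cons h t ih => simp only [List.foldl_cons, spinStep_fstack, ih]

-- the running balance equals 2·(count of "right") − length
theorem bal_eq (lst : List String) (bal : Int) :
    lst.foldl (fun b item => b + (if item == "right" then 1 else -1)) bal
      = bal + 2 * (lst.count "right" : Int) - (lst.length : Int) := by
  induction lst generalizing bal with
  | nil => simp
  | cons h t ih =>
    simp only [List.foldl_cons, ih, List.count_cons, List.length_cons]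
    by_cases hh : h = "right" <;> simp [hh] <;> ring

-- the ±90 list sums to 90·rights − 90·lefts
theorem sum_deg (lst : List String) :
    (lst.map (fun item => if item == "right" then (90 : Int) else -90)).sum
      = 90 * (2 * (lst.count "right" : Int) - (lst.length : Int)) := by
  induction lst with
  | nil => simp
  | cons h t ih =>
    simp only [List.map_cons, List.sum_cons, ih, List.count_cons, List.length_cons]
    by_cases hh : h = "right" <;> simp [hh] <;> ring

-- ===== VERDICT (by name: the statement is the Claim_ definition above) =====
theorem spin_around_spec : Claim_equal_spin_around := by
  intro lst _
  show spin_around lst = spin_around_alt lst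
  unfold spin_around spin_around_alt
  have hs : (List.foldl spinStep [] lst) = fstack (2 * (lst.count "right" : Int) - (lst.length : Int)) := by
    have := foldl_spinStep lst 0
    simp only [bal_eq, zero_add] at this
    simpa [fstack] using this
  simp only [PySem.List.foldl_append_singleton_eq_map, List.nil_append, sum_deg, hs]
  unfold fstack
  rw [PySem.Int.floordiv_eq_ediv_of_pos (by norm_num),
      PySem.Int.floordiv_eq_ediv_of_pos (by norm_num)]
  set b : Int := 2 * (lst.count "right" : Int) - (lst.length : Int)
  rw [abs_mul, abs_of_nonneg (by norm_num : (0:Int) ≤ 90),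
      show (360 : Int) = 90 * 4 by norm_num,
      Int.mul_ediv_mul_of_pos _ _ (by norm_num : (0:Int) < 90),
      List.length_replicate, Int.abs_eq_natAbs]
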